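-- pv_equiv track=rewrite | github.com/k-harada/AtCoder | ARC/ARC110/B.py | solve
-- ===== SOURCE A (Python) =====
-- def solve(n, t):
--
--     if n == 1:
--         if t[0] == "1":
--             return 20000000000
--         else:
--             return 10000000000
--
--     # start
--     if t[0] == "1":
--         if t[1] == "1":
--             start = 0
--         else:
--             start = 1
--     else:
--         start = 2
--
--     # check if valid
--     for i in range(n):
--         if (i + start) % 3 == 2:
--             if t[i] != "0":
--                 return 0
--         else:
--             if t[i] != "1":
--                 return 0
--
--     # count 0
--     count_0 = (n + start) // 3
--     if t[-1] == '0':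
--         return 10000000000 - count_0 + 1
--     else:
--         return 10000000000 - count_0
-- ===== SOURCE B (Python) =====
-- def solve(n, t):
--     if n == 1:
--         return 20000000000 if t[0] == "1" else 10000000000
--     if len(t) < n:
--         return 0
--     pat = "110" * (n // 3 + 2)
--     for off in (0, 1, 2):
--         if t[:n] == list(pat[off:off + n]):
--             return 10000000000 - (n + off) // 3 + (1 if t[-1] == "0" else 0)
--     return 0
-- ===== Notes on version B (the rewrite author's own statement) =====
-- stated objective: simpler
-- what changed: B replaces A's per-character modular-arithmetic validation loop by building the periodic '110' pattern once and testing the three possible phases by direct slice equality, returning the count formula for the matching phase.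
-- outside the precondition, e.g. on solve(-1, ['1', '1']): A returns 10000000001, B returns 0
import Mathlib
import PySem

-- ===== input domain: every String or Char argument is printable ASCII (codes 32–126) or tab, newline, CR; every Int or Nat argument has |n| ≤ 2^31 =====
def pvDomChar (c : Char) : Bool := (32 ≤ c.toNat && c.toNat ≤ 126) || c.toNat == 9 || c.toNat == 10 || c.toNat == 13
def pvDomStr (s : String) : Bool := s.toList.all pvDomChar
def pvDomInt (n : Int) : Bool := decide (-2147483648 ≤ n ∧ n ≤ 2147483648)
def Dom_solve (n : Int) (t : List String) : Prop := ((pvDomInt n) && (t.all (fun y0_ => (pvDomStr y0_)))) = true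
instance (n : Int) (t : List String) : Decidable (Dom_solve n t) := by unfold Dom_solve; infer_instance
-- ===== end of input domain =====

-- B builds the periodic '110' pattern once and tests the three phases by slice equality,
-- replacing A's per-character modular validation loop (objective: simpler).

-- ===== PORT A =====
-- the body of A's validation loop at index i
def cellB (t : List String) (c i : Int) : Bool :=
  if PySem.Int.mod (i + c) 3 = 2 then (PySem.List.pyGet? t i).getD "" == "0"
  else (PySem.List.pyGet? t i).getD "" == "1"

-- A's 'for i in range(n): … return 0' loop (early exit on the first bad character)
def checkLoop (t : List String) (c : Int) : Nat → Int → Bool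
  | 0, _ => true
  | Nat.succ k, i => if cellB t c i then checkLoop t c k (i + 1) else false

def solve (n : Int) (t : List String) : Int :=
  if n = 1 then
    if (PySem.List.pyGet? t 0).getD "" == "1" then 20000000000 else 10000000000
  else
    let start : Int :=
      if (PySem.List.pyGet? t 0).getD "" == "1" then
        if (PySem.List.pyGet? t 1).getD "" == "1" then 0 else 1
      else 2
    if checkLoop t start n.toNat 0 then
      let count0 : Int := PySem.Int.floordiv (n + start) 3
      if (PySem.List.pyGet? t (-1)).getD "" == "0" then 10000000000 - count0 + 1
      else 10000000000 - count0
    else 0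

-- ===== PORT B =====
def solve_alt (n : Int) (t : List String) : Int :=
  if n = 1 then
    if (PySem.List.pyGet? t 0).getD "" == "1" then 20000000000 else 10000000000
  else if (t.length : Int) < n then 0
  else
    let pat : List String :=
      (List.replicate (PySem.Int.floordiv n 3 + 2).toNat ["1", "1", "0"]).flatten
    match ([0, 1, 2] : List Int).find? (fun off =>
        PySem.List.slice t none (some n) == PySem.List.slice pat (some off) (some (off + n))) with
    | some off =>
        10000000000 - PySem.Int.floordiv (n + off) 3
          + (if (PySem.List.pyGet? t (-1)).getD "" == "0" then 1 else 0)
    | none => 0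

-- ===== PRECONDITION & SPEC =====
-- the character the '110' pattern carries at absolute position k
def phaseChar (k : Nat) : String := if k % 3 = 2 then "0" else "1"

-- t is, over its whole length, a prefix of the '110' pattern read from some phase
def MatchesSomePhase (t : List String) : Prop :=
  ∃ o < 3, ∀ i < t.length, t.getD i "" = phaseChar (o + i)

-- Pre_ excludes n < 1 (there A returns a value computed from a skipped validation loop and a
-- negative floor division — an indexing accident on a malformed (n, t) pair) and the inputs on
-- which A raises IndexError: empty t; t[0] == '1' with len(t) == 1 and n != 1; n > len(t) with
-- t a full prefix of some phase of the pattern. The contract is 1 <= n = len(t).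
def Pre_solve (n : Int) (t : List String) : Prop :=
  1 ≤ n ∧ t ≠ [] ∧ (n = 1 ∨ (¬(t.getD 0 "" = "1" ∧ t.length = 1) ∧
    (n ≤ (t.length : Int) ∨ ¬ MatchesSomePhase t)))
instance (n : Int) (t : List String) : Decidable (Pre_solve n t) := by
  unfold Pre_solve MatchesSomePhase; infer_instance
def pvWitness_solve : Int × List String := (3, ["1", "1", "0"])

def Spec_solve (n : Int) (t : List String) (out : Int) : Prop := out = solve_alt n t
instance (n : Int) (t : List String) (out : Int) : Decidable (Spec_solve n t out) := by unfold Spec_solve; infer_instance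

-- ===== CLAIM (what is proved, stated in full; the proofs are below) =====
def Claim_equal_solve : Prop := ∀ (n : Int) (t : List String), Dom_solve n t → Pre_solve n t → Spec_solve n t (solve n t)

-- ===== LEMMAS AND PROOFS =====

-- the first m characters of t match the pattern read from phase s
def Good (m s : Nat) (t : List String) : Prop :=
  ∀ i, i < m → ∀ (hi : i < t.length), t[i] = phaseChar (s + i)

lemma pat_getElem? (k j : Nat) (hj : j < 3 * k) :
    ((List.replicate k (["1", "1", "0"] : List String)).flatten)[j]? = some (phaseChar j) := by
  induction k generalizing j with
  | zero => omega
  | succ k ih =>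
    rw [show List.replicate (k+1) (["1","1","0"] : List String)
          = ["1","1","0"] :: List.replicate k ["1","1","0"] from rfl]
    match j with
    | 0 => simp [phaseChar]
    | 1 => simp [phaseChar]
    | 2 => simp [phaseChar]
    | (j'+3) =>
      have h := ih j' (by omega)
      have hph : phaseChar (j'+3) = phaseChar j' := by
        unfold phaseChar
        have : (j'+3) % 3 = j' % 3 := by omega
        rw [this]
      simp only [List.flatten_cons]
      rw [List.getElem?_append_right (by simp), hph]
      simpa using h

lemma cell_eq (t : List String) (s i : Nat) (c : Int) (hc : c = (s : Int)) (hi : i < t.length) :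
    (if PySem.Int.mod ((i : Int) + c) 3 = 2 then (PySem.List.pyGet? t (i : Int)).getD "" == "0"
     else (PySem.List.pyGet? t (i : Int)).getD "" == "1")
    = (t[i] == phaseChar (s + i)) := by
  subst hc
  have hm : PySem.Int.mod ((i : Int) + (s : Int)) 3 = (((i + s) % 3 : Nat) : Int) := by
    have h := PySem.Int.mod_natCast (i + s) 3
    exact_mod_cast h
  have hg : (PySem.List.pyGet? t (i : Int)).getD "" = t[i] := by
    rw [PySem.List.pyGet?_natCast, List.getElem?_eq_getElem hi, Option.getD_some]
  rw [hm, hg]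
  unfold phaseChar
  rw [Nat.add_comm s i]
  by_cases hmod : (i + s) % 3 = 2
  · rw [if_pos (by exact_mod_cast hmod), if_pos hmod]
  · rw [if_neg (by exact_mod_cast hmod), if_neg hmod]

lemma checkLoop_shift (t : List String) (c : Int) (k : Nat) : ∀ (i0 : Nat),
    (checkLoop t c k (i0 : Int) = true ↔
      ∀ j, j < k → cellB t c ((i0 + j : Nat) : Int) = true) := by
  induction k with
  | zero => intro i0; simp [checkLoop]
  | succ k ih =>
    intro i0
    simp only [checkLoop]
    by_cases hcell : cellB t c (i0 : Int) = true
    · rw [if_pos hcell, show ((i0 : Int) + 1) = ((i0 + 1 : Nat) : Int) from by push_cast; ring,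
        ih (i0 + 1)]
      constructor
      · intro h j hj
        match j with
        | 0 => simpa using hcell
        | j' + 1 =>
          have := h j' (by omega)
          simpa [show i0 + (j' + 1) = i0 + 1 + j' from by omega] using this
      · intro h j hj
        have := h (j + 1) (by omega)
        simpa [show i0 + 1 + j = i0 + (j + 1) from by omega] using this
    · rw [if_neg hcell]
      simp only [Bool.false_eq_true, false_iff]
      intro h
      exact hcell (by simpa using h 0 (by omega))

lemma check_iff_good (t : List String) (m s : Nat) (c : Int) (hc : c = (s : Int))
    (hmle : m ≤ t.length) :
    (checkLoop t c m 0 = true) ↔ Good m s t := by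
  rw [show (0 : Int) = ((0 : Nat) : Int) from rfl, checkLoop_shift t c m 0]
  simp only [Nat.zero_add]
  constructor
  · intro h i him hi
    have hb := h i him
    unfold cellB at hb
    rw [cell_eq t s i c hc hi] at hb
    exact beq_iff_eq.mp hb
  · intro h i him
    unfold cellB
    rw [cell_eq t s i c hc (lt_of_lt_of_le him hmle)]
    exact beq_iff_eq.mpr (h i him (lt_of_lt_of_le him hmle))

-- the phase A's first-two-character test selects
def sOf (t : List String) : Nat :=
  if (PySem.List.pyGet? t 0).getD "" == "1" then
    (if (PySem.List.pyGet? t 1).getD "" == "1" then 0 else 1) else 2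

lemma sOf_lt3 (t : List String) : sOf t < 3 := by
  unfold sOf; split_ifs <;> omega

lemma startInt_eq (t : List String) :
    (if (PySem.List.pyGet? t 0).getD "" == "1" then
       (if (PySem.List.pyGet? t 1).getD "" == "1" then (0 : Int) else 1) else 2)
    = ((sOf t : Nat) : Int) := by
  unfold sOf; split_ifs <;> norm_num

lemma sOf_eq (t : List String) (o m : Nat) (hm2 : 2 ≤ m) (hmle : m ≤ t.length)
    (ho : o < 3) (hg : Good m o t) : sOf t = o := by
  unfold sOf
  have h0 : (PySem.List.pyGet? t 0).getD "" = phaseChar o := by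
    rw [PySem.List.pyGet?_zero, List.getElem?_eq_getElem (by omega), Option.getD_some]
    simpa using hg 0 (by omega) (by omega)
  have h1 : (PySem.List.pyGet? t 1).getD "" = phaseChar (o + 1) := by
    have hx : PySem.List.pyGet? t 1 = some t[1] := by
      simpa using PySem.List.pyGet?_ofNat t 1 (by omega)
    rw [hx, Option.getD_some]
    exact hg 1 (by omega) (by omega)
  rw [h0, h1]
  interval_cases o <;> simp [phaseChar]

lemma patlen (k : Nat) :
    ((List.replicate k (["1", "1", "0"] : List String)).flatten).length = k * 3 := by
  induction k with
  | zero => simp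
  | succ k ih =>
    rw [List.replicate_succ, List.flatten_cons, List.length_append, ih]
    simp
    omega

lemma floordiv_toNat (m : Nat) : (PySem.Int.floordiv (m : Int) 3 + 2).toNat = m / 3 + 2 := by
  rw [show (3 : Int) = ((3 : Nat) : Int) from by norm_num, PySem.Int.floordiv_natCast]
  omega

lemma match_iff (t : List String) (m o : Nat) (c : Int) (hc : c = (o : Int)) (ho : o < 3)
    (hmle : m ≤ t.length) :
    ((PySem.List.slice t none (some (m : Int)) == PySem.List.slice
        ((List.replicate (PySem.Int.floordiv (m : Int) 3 + 2).toNat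
          (["1", "1", "0"] : List String)).flatten) (some c) (some (c + (m : Int)))) = true)
    ↔ Good m o t := by
  subst hc
  rw [floordiv_toNat m, PySem.List.slice_to_natCast, PySem.List.slice_natCast_add]
  have hcand : (((List.replicate (m / 3 + 2) (["1", "1", "0"] : List String)).flatten).drop
        o).take m
      = (List.range m).map (fun i => phaseChar (o + i)) := by
    apply List.ext_getElem
    · rw [List.length_take, List.length_drop, patlen (m / 3 + 2), List.length_map, List.length_range]
      omega
    · intro i hi1 hi2
      rw [List.length_take, List.length_drop, patlen (m / 3 + 2)] at hi1
      rw [List.getElem_take, List.getElem_drop]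
      have hsome := pat_getElem? (m / 3 + 2) (o + i) (by omega)
      rw [List.getElem?_eq_getElem (by rw [patlen (m / 3 + 2)]; omega)] at hsome
      simp only [List.getElem_map, List.getElem_range]
      exact Option.some.inj hsome
  rw [hcand, beq_iff_eq]
  constructor
  · intro h i him hi
    have hti : i < (t.take m).length := by
      rw [List.length_take]; omega
    have := List.getElem_of_eq h hti
    rw [List.getElem_take] at this
    rw [this]
    simp
  · intro h
    apply List.ext_getElem (by rw [List.length_take, List.length_map, List.length_range]; omega)
    intro i hi1 hi2
    simp only [List.getElem_take, List.getElem_map, List.getElem_range]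
    exact h i (by simpa using hi2) (by rw [List.length_take] at hi1; omega)

lemma val_shape (b : Bool) (x y : Int) (h : x = y) :
    (if b then (10000000000 : Int) - PySem.Int.floordiv x 3 + 1
     else 10000000000 - PySem.Int.floordiv x 3)
    = 10000000000 - PySem.Int.floordiv y 3 + (if b then (1 : Int) else 0) := by
  subst h; split_ifs <;> ring

lemma solve_main (n : Int) (t : List String) (hpre : Pre_solve n t) :
    solve n t = solve_alt n t := by
  obtain ⟨h1, -, -⟩ := hpre
  obtain ⟨m, rfl⟩ : ∃ m : Nat, n = (m : Int) := ⟨n.toNat, by omega⟩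
  by_cases hm : m = 1
  · subst hm
    norm_num [solve, solve_alt]
  · have hm2 : 2 ≤ m := by omega
    have hne1 : ¬((m : Int) = 1) := by omega
    by_cases hmle : m ≤ t.length
    · have hnlt : ¬((t.length : Int) < (m : Int)) := by omega
      unfold solve solve_alt
      rw [if_neg hne1, if_neg hne1, if_neg hnlt]
      simp only [startInt_eq t, Int.toNat_natCast]
      by_cases hG : Good m (sOf t) t
      · rw [if_pos ((check_iff_good t m (sOf t) _ rfl hmle).mpr hG)]
        rcases (by have := sOf_lt3 t; omega : sOf t = 0 ∨ sOf t = 1 ∨ sOf t = 2) with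
          hval | hval | hval
        · have hp0 := (match_iff t m 0 0 (by norm_num) (by omega) hmle).mpr (hval ▸ hG)
          simp only [List.find?_cons, hp0]
          exact val_shape _ _ _ (by rw [hval]; norm_num)
        · have hnp0 : _ = false := Bool.eq_false_iff.mpr (fun h => by
            have := sOf_eq t 0 m hm2 hmle (by omega)
              ((match_iff t m 0 0 (by norm_num) (by omega) hmle).mp h)
            omega)
          have hp1 := (match_iff t m 1 1 (by norm_num) (by omega) hmle).mpr (hval ▸ hG)
          simp only [List.find?_cons, hnp0, hp1]
          exact val_shape _ _ _ (by rw [hval]; norm_num)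
        · have hnp0 : _ = false := Bool.eq_false_iff.mpr (fun h => by
            have := sOf_eq t 0 m hm2 hmle (by omega)
              ((match_iff t m 0 0 (by norm_num) (by omega) hmle).mp h)
            omega)
          have hnp1 : _ = false := Bool.eq_false_iff.mpr (fun h => by
            have := sOf_eq t 1 m hm2 hmle (by omega)
              ((match_iff t m 1 1 (by norm_num) (by omega) hmle).mp h)
            omega)
          have hp2 := (match_iff t m 2 2 (by norm_num) (by omega) hmle).mpr (hval ▸ hG)
          simp only [List.find?_cons, hnp0, hnp1, hp2]
          exact val_shape _ _ _ (by rw [hval]; norm_num)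
      · rw [if_neg (fun h => hG ((check_iff_good t m (sOf t) _ rfl hmle).mp h))]
        have hno : ∀ o : Nat, o < 3 → ¬ Good m o t := fun o ho h => by
          have := sOf_eq t o m hm2 hmle ho h
          exact hG (by rw [this]; exact h)
        have hnp0 : _ = false := Bool.eq_false_iff.mpr
          (fun h => hno 0 (by omega) ((match_iff t m 0 0 (by norm_num) (by omega) hmle).mp h))
        have hnp1 : _ = false := Bool.eq_false_iff.mpr
          (fun h => hno 1 (by omega) ((match_iff t m 1 1 (by norm_num) (by omega) hmle).mp h))
        have hnp2 : _ = false := Bool.eq_false_iff.mpr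
          (fun h => hno 2 (by omega) ((match_iff t m 2 2 (by norm_num) (by omega) hmle).mp h))
        simp only [List.find?_cons, hnp0, hnp1, hnp2, List.find?_nil]
    · -- n exceeds len(t): A's loop fails at position len(t), B returns 0 on the length test
      have hgt : t.length < m := by omega
      unfold solve solve_alt
      rw [if_neg hne1, if_neg hne1]
      simp only [startInt_eq t, Int.toNat_natCast]
      have hA : ¬(checkLoop t ((sOf t : Nat) : Int) m 0 = true) := by
        intro hall
        rw [show (0 : Int) = ((0 : Nat) : Int) from rfl,
          checkLoop_shift t ((sOf t : Nat) : Int) m 0] at hall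
        have hx := hall t.length hgt
        simp only [Nat.zero_add] at hx
        unfold cellB at hx
        have hnone : PySem.List.pyGet? t (t.length : Int) = none := by
          rw [PySem.List.pyGet?_natCast]
          exact List.getElem?_eq_none (le_refl _)
        rw [hnone] at hx
        simp at hx
      rw [if_neg hA, if_pos (show (t.length : Int) < (m : Int) by exact_mod_cast hgt)]

-- ===== VERDICT (by name: the statement is the Claim_ definition above) =====
theorem solve_spec : Claim_equal_solve := by
  intro n t _ hpre
  unfold Spec_solve
  exact solve_main n t hpre
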